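-- pv_equiv track=rewrite | github.com/hamdanyasser/NLP-NER-Project | src/utils/analysis.py | compute_confusion_matrix
-- ===== SOURCE A (Python) =====
-- from typing import Dict, List, Tuple, Optional, Set
--
-- def compute_confusion_matrix(
--     true_tags_list: List[List[str]],
--     pred_tags_list: List[List[str]],
--     label_names: List[str]
-- ) -> Dict[str, Dict[str, int]]:
--     """
--     Compute token-level confusion matrix.
--
--     Args:
--         true_tags_list: List of true tag sequences
--         pred_tags_list: List of predicted tag sequences
--         label_names: List of label names
--
--     Returns:
--         Nested dictionary: confusion_matrix[true_label][pred_label] = count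
--     """
--     # Initialize confusion matrix
--     confusion = {label: {l: 0 for l in label_names} for label in label_names}
--
--     for true_tags, pred_tags in zip(true_tags_list, pred_tags_list):
--         for true_tag, pred_tag in zip(true_tags, pred_tags):
--             if true_tag in confusion and pred_tag in confusion[true_tag]:
--                 confusion[true_tag][pred_tag] += 1
--
--     return confusion
-- ===== SOURCE B (Python) =====
-- def compute_confusion_matrix(true_tags_list, pred_tags_list, label_names):
--     # Stage 1: flatten all aligned token pairs into one list.
--     pairs = [(t, p)
--              for true_tags, pred_tags in zip(true_tags_list, pred_tags_list)
--              for t, p in zip(true_tags, pred_tags)]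
--     # Stage 2: for each true label, select its predictions, then fill the row
--     # by counting each predicted label in that selection.
--     matrix = {}
--     for label in label_names:
--         preds = [p for t, p in pairs if t == label]
--         matrix[label] = {l: preds.count(l) for l in label_names}
--     return matrix
-- ===== Notes on version B (the rewrite author's own statement) =====
-- stated objective: alternative
-- what changed: B keeps no counting state: it flattens the aligned token pairs into one list, then for each true label filters out that label's predictions and fills the row cell-by-cell with preds.count(l); A instead pre-builds a zeroed nested dict and increments cells in place behind a membership guard while traversing the tokens.
import Mathlib
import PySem

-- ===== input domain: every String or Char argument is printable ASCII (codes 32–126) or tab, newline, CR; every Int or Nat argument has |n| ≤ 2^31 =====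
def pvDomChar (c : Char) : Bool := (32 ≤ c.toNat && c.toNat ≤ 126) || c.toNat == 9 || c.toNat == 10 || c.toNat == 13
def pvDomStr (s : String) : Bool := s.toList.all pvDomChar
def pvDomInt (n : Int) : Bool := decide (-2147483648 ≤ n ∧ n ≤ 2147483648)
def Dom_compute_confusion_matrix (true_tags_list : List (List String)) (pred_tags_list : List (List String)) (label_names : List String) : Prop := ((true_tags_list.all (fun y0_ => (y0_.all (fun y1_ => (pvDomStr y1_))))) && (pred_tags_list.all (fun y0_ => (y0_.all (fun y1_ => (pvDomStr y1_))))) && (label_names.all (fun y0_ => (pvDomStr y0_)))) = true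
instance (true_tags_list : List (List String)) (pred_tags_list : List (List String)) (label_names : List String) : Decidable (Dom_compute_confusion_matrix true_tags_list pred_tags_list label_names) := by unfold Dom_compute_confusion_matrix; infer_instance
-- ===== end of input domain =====

-- B keeps no counting state: it flattens the aligned token pairs once, then for each
-- true label selects that label's predictions and fills the row cell-by-cell with
-- preds.count(l); A increments a pre-zeroed nested dict in place during traversal
-- (objective: alternative decomposition).

-- ===== PORT A =====
-- confusion = {label: {l: 0 for l in label_names} for label in label_names}
def cmA_zeroRow (label_names : List String) : PySem.Dict String Int :=
  label_names.foldl (fun d l => d.insert l 0) PySem.Dict.empty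

def cmA_init (label_names : List String) : PySem.Dict String (PySem.Dict String Int) :=
  label_names.foldl (fun d label => d.insert label (cmA_zeroRow label_names)) PySem.Dict.empty

-- body of the token loop: if true_tag in confusion and pred_tag in confusion[true_tag]:
--   confusion[true_tag][pred_tag] += 1   (in-place update = overwrite at the same key)
def cmA_step (conf : PySem.Dict String (PySem.Dict String Int)) (tp : String × String) :
    PySem.Dict String (PySem.Dict String Int) :=
  match conf.get? tp.1 with
  | some row => if row.contains tp.2 then conf.insert tp.1 (row.modify tp.2 0 (· + 1)) else conf
  | none => conf

def compute_confusion_matrix (true_tags_list : List (List String)) (pred_tags_list : List (List String)) (label_names : List String) : List (String × List (String × Int)) :=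
  ((true_tags_list.zip pred_tags_list).foldl
      (fun conf pr => (pr.1.zip pr.2).foldl cmA_step conf)
      (cmA_init label_names)).items.map (fun p => (p.1, p.2.items))

-- ===== PORT B =====
-- pairs = [(t, p) for true_tags, pred_tags in zip(...) for t, p in zip(true_tags, pred_tags)]
def cmB_pairs (true_tags_list : List (List String)) (pred_tags_list : List (List String)) :
    List (String × String) :=
  (true_tags_list.zip pred_tags_list).flatMap (fun pr => pr.1.zip pr.2)

-- preds = [p for t, p in pairs if t == label];  {l: preds.count(l) for l in label_names}
def cmB_row (pairs : List (String × String)) (label_names : List String) (label : String) : PySem.Dict String Int :=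
  let preds := (pairs.filter (fun tp => tp.1 == label)).map (fun tp => tp.2)
  label_names.foldl (fun r l => r.insert l (PySem.List.count preds l : Int)) PySem.Dict.empty

def compute_confusion_matrix_alt (true_tags_list : List (List String)) (pred_tags_list : List (List String)) (label_names : List String) : List (String × List (String × Int)) :=
  (label_names.foldl
      (fun d label => d.insert label (cmB_row (cmB_pairs true_tags_list pred_tags_list) label_names label))
      PySem.Dict.empty).items.map (fun p => (p.1, p.2.items))

-- ===== PRECONDITION & SPEC =====
def Spec_compute_confusion_matrix (true_tags_list : List (List String)) (pred_tags_list : List (List String)) (label_names : List String) (out : List (String × List (String × Int))) : Prop := out = compute_confusion_matrix_alt true_tags_list pred_tags_list label_names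
instance (true_tags_list : List (List String)) (pred_tags_list : List (List String)) (label_names : List String) (out : List (String × List (String × Int))) : Decidable (Spec_compute_confusion_matrix true_tags_list pred_tags_list label_names out) := by unfold Spec_compute_confusion_matrix; infer_instance

-- ===== CLAIM (what is proved, stated in full; the proofs are below) =====
def Claim_equal_compute_confusion_matrix : Prop := ∀ (true_tags_list : List (List String)) (pred_tags_list : List (List String)) (label_names : List String), Dom_compute_confusion_matrix true_tags_list pred_tags_list label_names → Spec_compute_confusion_matrix true_tags_list pred_tags_list label_names (compute_confusion_matrix true_tags_list pred_tags_list label_names)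

-- ===== LEMMAS AND PROOFS =====

-- a fold of key-driven inserts whose values do not depend on the state
theorem getD_foldl_insert_fun {κ ν : Type} [BEq κ] [LawfulBEq κ] [DecidableEq κ]
    (L : List κ) (f : κ → ν) (d : PySem.Dict κ ν) (k : κ) (dflt : ν) :
    (L.foldl (fun d x => d.insert x (f x)) d).getD k dflt
      = if k ∈ L then f k else d.getD k dflt := by
  induction L generalizing d with
  | nil => simp
  | cons x xs ih =>
      simp only [List.foldl_cons, ih, PySem.Dict.getD_insert, List.mem_cons]
      by_cases hx : k ∈ xs <;> by_cases he : k = x <;> simp [hx, he]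

-- one A-step: keys are unchanged
theorem cmA_step_keys (conf : PySem.Dict String (PySem.Dict String Int)) (tp : String × String) :
    (cmA_step conf tp).keys = conf.keys := by
  unfold cmA_step
  cases h : conf.get? tp.1 with
  | none => rfl
  | some row =>
      simp only
      split
      · exact PySem.Dict.keys_insert_of_contains conf _
          (by rw [PySem.Dict.contains_eq_isSome_get?, h]; rfl)
      · rfl

-- one A-step: every row keeps its key set
theorem cmA_step_inv (IK : List String) (conf : PySem.Dict String (PySem.Dict String Int))
    (tp : String × String)
    (hinv : ∀ lab row, conf.get? lab = some row → row.keys = IK) :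
    ∀ lab row, (cmA_step conf tp).get? lab = some row → row.keys = IK := by
  intro lab row hget
  unfold cmA_step at hget
  cases h : conf.get? tp.1 with
  | none => rw [h] at hget; exact hinv _ _ hget
  | some r =>
      rw [h] at hget; simp only at hget
      split at hget
      · rename_i hc
        rw [PySem.Dict.get?_insert] at hget
        split at hget
        · injection hget with hrow
          rw [← hrow, PySem.Dict.keys_modify,
            PySem.Dict.keys_insert_of_contains r _ hc]
          exact hinv _ _ h
        · exact hinv _ _ hget
      · exact hinv _ _ hget

-- one A-step: the (lab, l) entry moves by 1 exactly when tp = (lab, l)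
theorem cmA_step_entry (IK : List String) (conf : PySem.Dict String (PySem.Dict String Int))
    (tp : String × String) (lab l : String)
    (hinv : ∀ lab row, conf.get? lab = some row → row.keys = IK)
    (hlab : conf.contains lab = true) (hl : l ∈ IK) :
    ((cmA_step conf tp).getD lab PySem.Dict.empty).getD l 0
      = (conf.getD lab PySem.Dict.empty).getD l 0 + (if tp = (lab, l) then 1 else 0) := by
  unfold cmA_step
  cases h : conf.get? tp.1 with
  | none =>
      have hne : tp ≠ (lab, l) := by
        intro he; subst he
        rw [PySem.Dict.contains_eq_isSome_get?, h] at hlab; simp at hlab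
      simp [hne]
  | some row =>
      simp only
      split
      · rename_i hc
        have hrow : conf.getD tp.1 PySem.Dict.empty = row :=
          PySem.Dict.getD_of_get?_eq_some conf _ h
        rw [PySem.Dict.getD_insert]
        by_cases he : lab = tp.1
        · rw [if_pos he, PySem.Dict.getD_modify, he, hrow]
          by_cases hp : l = tp.2
          · subst hp; simp
          · have hne : tp ≠ (tp.1, l) := fun hx => hp ((congrArg Prod.snd hx).symm)
            simp [hp, hne]
        · have hne : tp ≠ (lab, l) := fun hx => he (congrArg Prod.fst hx).symm
          simp [he, hne]
      · rename_i hnc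
        have hne : tp ≠ (lab, l) := by
          intro he; subst he
          have hrow : row.keys = IK := hinv _ _ h
          rw [PySem.Dict.contains_iff_mem_keys, hrow] at hnc
          exact hnc hl
        simp [hne]

-- the whole A token loop, as an entry-wise count
theorem cmA_loop (IK : List String) (pairs : List (String × String)) :
    ∀ (conf : PySem.Dict String (PySem.Dict String Int)),
      (∀ lab row, conf.get? lab = some row → row.keys = IK) →
      (pairs.foldl cmA_step conf).keys = conf.keys ∧
      (∀ lab row, (pairs.foldl cmA_step conf).get? lab = some row → row.keys = IK) ∧
      (∀ lab l, conf.contains lab = true → l ∈ IK →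
        ((pairs.foldl cmA_step conf).getD lab PySem.Dict.empty).getD l 0
          = (conf.getD lab PySem.Dict.empty).getD l 0 + pairs.count (lab, l)) := by
  induction pairs with
  | nil => intro conf hinv; exact ⟨rfl, hinv, fun _ _ _ _ => by simp⟩
  | cons tp rest ih =>
      intro conf hinv
      have hinv' := cmA_step_inv IK conf tp hinv
      obtain ⟨hk, hi, he⟩ := ih (cmA_step conf tp) hinv'
      refine ⟨by rw [List.foldl_cons, hk, cmA_step_keys], hi, ?_⟩
      intro lab l hlab hl
      have hlab' : (cmA_step conf tp).contains lab = true := by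
        rw [PySem.Dict.contains_iff_mem_keys, cmA_step_keys]
        rw [PySem.Dict.contains_iff_mem_keys] at hlab
        exact hlab
      rw [List.foldl_cons, he lab l hlab' hl, cmA_step_entry IK conf tp lab l hinv hlab hl,
        List.count_cons]
      by_cases hx : tp = (lab, l)
      · subst hx; simp; omega
      · have hx' : ¬((tp == (lab, l)) = true) := by simpa using hx
        simp [hx, hx']

-- a fold of key-driven inserts whose values do not depend on the state, get? version
theorem get?_foldl_insert_fun {κ ν : Type} [BEq κ] [LawfulBEq κ] [DecidableEq κ]
    (L : List κ) (f : κ → ν) (d : PySem.Dict κ ν) (k : κ) :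
    (L.foldl (fun d x => d.insert x (f x)) d).get? k
      = if k ∈ L then some (f k) else d.get? k := by
  induction L generalizing d with
  | nil => simp
  | cons x xs ih =>
      simp only [List.foldl_cons, ih, PySem.Dict.get?_insert, List.mem_cons]
      by_cases hx : k ∈ xs <;> by_cases he : k = x <;> simp [hx, he]

-- counting l among the predictions selected for true label k = counting the pair (k, l)
theorem count_filter_map_snd (pairs : List (String × String)) (k l : String) :
    ((pairs.filter (fun tp => tp.1 == k)).map (fun tp => tp.2)).count l
      = pairs.count (k, l) := by
  induction pairs with
  | nil => rfl
  | cons tp rest ih =>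
      obtain ⟨t, p⟩ := tp
      by_cases ht : t = k <;> by_cases hp : p = l <;>
        simp [Prod.ext_iff, ht, hp, ih]

-- ===== VERDICT (by name: the statement is the Claim_ definition above) =====
theorem compute_confusion_matrix_spec : Claim_equal_compute_confusion_matrix := by
  intro T P L _
  unfold Spec_compute_confusion_matrix compute_confusion_matrix compute_confusion_matrix_alt
  have hflatA :
      (T.zip P).foldl (fun conf pr => (pr.1.zip pr.2).foldl cmA_step conf) (cmA_init L)
        = ((T.zip P).flatMap (fun pr => pr.1.zip pr.2)).foldl cmA_step (cmA_init L) :=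
    List.foldl_flatMap.symm
  have hpairs : cmB_pairs T P = (T.zip P).flatMap (fun pr => pr.1.zip pr.2) := rfl
  rw [hflatA, hpairs]
  set tps := (T.zip P).flatMap (fun pr => pr.1.zip pr.2) with htps
  set K := PySem.Set.ofList L with hKdef
  have hKnd : K.Nodup := PySem.Set.nodup_ofList L
  have hzk : (cmA_zeroRow L).keys = K := by
    unfold cmA_zeroRow; rw [PySem.Dict.keys_foldl_insert]; rfl
  have hik : (cmA_init L).keys = K := by
    unfold cmA_init; rw [PySem.Dict.keys_foldl_insert]; rfl
  have hbk : ∀ k, (cmB_row tps L k).keys = K := by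
    intro k; unfold cmB_row; rw [PySem.Dict.keys_foldl_insert]; rfl
  have hinv0 : ∀ lab row, (cmA_init L).get? lab = some row → row.keys = K := by
    intro lab row hget
    unfold cmA_init at hget
    rw [get?_foldl_insert_fun] at hget
    split at hget
    · cases hget; exact hzk
    · rw [PySem.Dict.get?_empty] at hget; cases hget
  obtain ⟨hk, hinv, hent⟩ := cmA_loop K tps (cmA_init L) hinv0
  set CA := tps.foldl cmA_step (cmA_init L) with hCAdef
  set CB := L.foldl (fun d label => d.insert label (cmB_row tps L label)) PySem.Dict.empty
    with hCBdef
  have hck : CB.keys = K := by rw [hCBdef, PySem.Dict.keys_foldl_insert]; rfl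
  suffices hCC : CA = CB by rw [hCC]
  apply PySem.Dict.ext
  rw [PySem.Dict.items_eq_map_keys CA (by rw [hk, hik]; exact hKnd) PySem.Dict.empty,
      PySem.Dict.items_eq_map_keys CB (by rw [hck]; exact hKnd) PySem.Dict.empty,
      hk, hik, hck]
  apply List.map_congr_left
  intro k hkK
  have hkL : k ∈ L := (PySem.Set.mem_ofList L k).mp (hKdef ▸ hkK)
  have hCBk : CB.getD k PySem.Dict.empty = cmB_row tps L k := by
    rw [hCBdef, getD_foldl_insert_fun, if_pos hkL]
  have hcont : (cmA_init L).contains k = true := by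
    rw [PySem.Dict.contains_iff_mem_keys, hik]; exact hkK
  obtain ⟨rowA, hrowA⟩ : ∃ r, CA.get? k = some r := by
    have hc : CA.contains k = true := by
      rw [PySem.Dict.contains_iff_mem_keys, hk, hik]; exact hkK
    rw [PySem.Dict.contains_eq_isSome_get?] at hc
    exact Option.isSome_iff_exists.mp hc
  have hrowAgetD : CA.getD k PySem.Dict.empty = rowA :=
    PySem.Dict.getD_of_get?_eq_some CA _ hrowA
  have hrowAkeys : rowA.keys = K := hinv _ _ hrowA
  rw [hCBk, hrowAgetD]
  refine congrArg (Prod.mk k) ?_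
  apply PySem.Dict.ext
  rw [PySem.Dict.items_eq_map_keys rowA (by rw [hrowAkeys]; exact hKnd) 0,
      PySem.Dict.items_eq_map_keys (cmB_row tps L k) (by rw [hbk]; exact hKnd) 0,
      hrowAkeys, hbk]
  apply List.map_congr_left
  intro l hlK
  have hlL : l ∈ L := (PySem.Set.mem_ofList L l).mp (hKdef ▸ hlK)
  refine congrArg (Prod.mk l) ?_
  have hA : rowA.getD l 0 = ((cmA_init L).getD k PySem.Dict.empty).getD l 0 + tps.count (k, l) := by
    rw [← hrowAgetD]; exact hent k l hcont hlK
  have hinit0 : ((cmA_init L).getD k PySem.Dict.empty).getD l 0 = 0 := by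
    unfold cmA_init
    rw [getD_foldl_insert_fun, if_pos hkL]
    unfold cmA_zeroRow
    rw [getD_foldl_insert_fun, if_pos hlL]
  have hB : (cmB_row tps L k).getD l 0 = (tps.count (k, l) : Int) := by
    unfold cmB_row
    rw [getD_foldl_insert_fun, if_pos hlL, PySem.List.count_eq, count_filter_map_snd]
  rw [hA, hinit0, hB]
  omega
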